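-- pv_equiv track=rewrite | github.com/Android-Observatory/PermissionTainter | permissionTracer_api.py | _get_types_as_list
-- ===== SOURCE A (Python) =====
-- def _get_types_as_list(types_str: str):
--     """
--     Get the smali types of a string as a list of
--     types, we will parse it as a list of types.
--
--     :parameter types_str: string with a list of types (it can be just one).
--     :return: list
--     """
--     types_list = []
--     types_str = types_str.replace('(', '').replace(')', '')
--
--     len_types_str = len(types_str)
--
--     is_object = False
--     is_array = False
--     start_index = 0
--
--     for i in range(len_types_str):
--
--         if is_object:
--             if types_str[i] == ';':
--                 is_object = False
--                 if not is_array: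
--                     types_list.append(str(types_str[start_index:i+1]))
--                 else:
--                     types_list.append(
--                         str(types_str[start_index:i+1]) + "[]")
--                     is_array = False
--             else:
--                 continue
--
--         if types_str[i] == 'Z':
--             if not is_array:
--                 types_list.append('boolean')
--             else:
--                 types_list.append('boolean[]')
--                 is_array = False
--         elif types_str[i] == 'B':
--             if not is_array:
--                 types_list.append('byte')
--             else:
--                 types_list.append('byte[]')
--                 is_array = False
--         elif types_str[i] == 'C':
--             if not is_array:
--                 types_list.append('char')
--             else:
--                 types_list.append('char[]')
--                 is_array = False
--         elif types_str[i] == 'D':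
--             if not is_array:
--                 types_list.append('double')
--             else:
--                 types_list.append('double[]')
--                 is_array = False
--         elif types_str[i] == 'F':
--             if not is_array:
--                 types_list.append('float')
--             else:
--                 types_list.append('float[]')
--                 is_array = False
--         elif types_str[i] == 'I':
--             if not is_array:
--                 types_list.append('integer')
--             else:
--                 types_list.append('integer[]')
--                 is_array = False
--         elif types_str[i] == 'J':
--             if not is_array:
--                 types_list.append('long')
--             else:
--                 types_list.append('long[]')
--                 is_array = False
--         elif types_str[i] == 'S':
--             if not is_array:
--                 types_list.append('short')
--             else:
--                 types_list.append('short[]')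
--                 is_array = False
--         elif types_str[i] == 'V':
--             if not is_array:
--                 types_list.append('void')
--             else:
--                 types_list.append('void[]')
--                 is_array = False
--         elif types_str[i] == 'L':
--             is_object = True
--             start_index = i
--         elif types_str[i] == '[':
--             is_array = True
--
--     return types_list
-- ===== SOURCE B (Python) =====
-- PRIM = {'Z': 'boolean', 'B': 'byte', 'C': 'char', 'D': 'double',
--         'F': 'float', 'I': 'integer', 'J': 'long', 'S': 'short',
--         'V': 'void'}
--
--
-- def _get_types_as_list(types_str: str):
--     """Staged parse: split the descriptor string on ';' so each piece ends
--     exactly one object type; partition each piece at its first 'L' and map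
--     the primitive codes before it through a table."""
--     s = types_str.replace('(', '').replace(')', '')
--     out = []
--     arr = False
--     segments = s.split(';')
--     for k, seg in enumerate(segments):
--         head, found_l, obj = seg.partition('L')
--         for c in head:
--             if c == '[':
--                 arr = True
--             elif c in PRIM:
--                 out.append(PRIM[c] + ('[]' if arr else ''))
--                 arr = False
--         if found_l:
--             if k == len(segments) - 1:
--                 break  # unterminated object descriptor: nothing more follows
--             out.append('L' + obj + ';' + ('[]' if arr else ''))
--             arr = False
--     return out
-- ===== Notes on version B (the rewrite author's own statement) =====
-- stated objective: simpler
-- what changed: Replaces A's 60-line per-character state machine (is_object/is_array flags, 9-branch elif chain, manual start_index slicing) by a staged parse: split the string on the descriptor terminator so every piece ends exactly one object type, partition each piece at its first object-start letter, and map the primitive codes before it through a table.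
import Mathlib
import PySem

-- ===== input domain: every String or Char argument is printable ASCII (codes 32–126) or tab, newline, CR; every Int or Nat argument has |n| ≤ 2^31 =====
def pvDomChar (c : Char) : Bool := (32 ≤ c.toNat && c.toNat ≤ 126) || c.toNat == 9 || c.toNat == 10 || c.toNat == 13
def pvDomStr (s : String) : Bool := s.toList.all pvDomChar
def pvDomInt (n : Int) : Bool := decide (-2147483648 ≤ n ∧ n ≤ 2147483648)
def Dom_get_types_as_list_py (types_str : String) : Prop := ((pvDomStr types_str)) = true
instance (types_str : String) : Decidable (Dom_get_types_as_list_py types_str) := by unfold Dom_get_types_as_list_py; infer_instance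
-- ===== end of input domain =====

-- B changes: instead of A's per-character is_object/is_array state machine, B splits the
-- string on ';' and partitions each piece at its first 'L' (objective: simpler staged parse).

-- ===== PORT A =====
-- A's `for i in range(len)` loop with state (is_object, is_array, start_index, types_list),
-- transcribed as index recursion i := 0,1,…  (the fuel argument, started at the list length,
-- only makes the recursion structural: it never runs out while i < length).
-- The slice types_str[start:i+1] is exact as (cs.drop start).take (i+1-start) since
-- 0 ≤ start ≤ i+1 ≤ len on every path that reads it.
def pvGoA (cs : List Char) : Nat → Nat → Bool → Bool → Nat → List String → List String
  | 0, _, _, _, _, acc => acc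
  | fuel+1, i, obj, arr, start, acc =>
    if i < cs.length then
      if obj then
        if cs[i]! = ';' then
          pvGoA cs fuel (i+1) false false start
            (acc ++ [if arr then String.ofList ((cs.drop start).take (i+1-start)) ++ "[]"
                     else String.ofList ((cs.drop start).take (i+1-start))])
        else
          pvGoA cs fuel (i+1) true arr start acc
      else
        if cs[i]! = 'Z' then pvGoA cs fuel (i+1) false false start (acc ++ [if arr then "boolean[]" else "boolean"])
        else if cs[i]! = 'B' then pvGoA cs fuel (i+1) false false start (acc ++ [if arr then "byte[]" else "byte"])
        else if cs[i]! = 'C' then pvGoA cs fuel (i+1) false false start (acc ++ [if arr then "char[]" else "char"])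
        else if cs[i]! = 'D' then pvGoA cs fuel (i+1) false false start (acc ++ [if arr then "double[]" else "double"])
        else if cs[i]! = 'F' then pvGoA cs fuel (i+1) false false start (acc ++ [if arr then "float[]" else "float"])
        else if cs[i]! = 'I' then pvGoA cs fuel (i+1) false false start (acc ++ [if arr then "integer[]" else "integer"])
        else if cs[i]! = 'J' then pvGoA cs fuel (i+1) false false start (acc ++ [if arr then "long[]" else "long"])
        else if cs[i]! = 'S' then pvGoA cs fuel (i+1) false false start (acc ++ [if arr then "short[]" else "short"])
        else if cs[i]! = 'V' then pvGoA cs fuel (i+1) false false start (acc ++ [if arr then "void[]" else "void"])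
        else if cs[i]! = 'L' then pvGoA cs fuel (i+1) true arr i acc
        else if cs[i]! = '[' then pvGoA cs fuel (i+1) false true start acc
        else pvGoA cs fuel (i+1) false arr start acc
    else acc

def get_types_as_list_py (types_str : String) : List String :=
  let ts := PySem.Str.replace (PySem.Str.replace types_str "(" "") ")" ""
  pvGoA ts.toList ts.toList.length 0 false false 0 []

-- ===== PORT B =====
-- PRIM.get(c) / `c in PRIM` for B's literal dict of primitive codes
def pvPrim (c : Char) : Option String :=
  match c with
  | 'Z' => some "boolean" | 'B' => some "byte"  | 'C' => some "char"
  | 'D' => some "double"  | 'F' => some "float" | 'I' => some "integer"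
  | 'J' => some "long"    | 'S' => some "short" | 'V' => some "void"
  | _ => none

-- s.split(';') on the character list (Python's str.split with a separator: non-empty result)
def pvSplitSemi : List Char → List (List Char)
  | [] => [[]]
  | c :: t =>
    if c = ';' then [] :: pvSplitSemi t
    else
      match pvSplitSemi t with
      | s :: ss => (c :: s) :: ss
      | [] => [[c]]   -- unreachable: pvSplitSemi never returns []

-- B's inner `for c in head` loop: returns the updated (arr, out)
def pvGoHead : List Char → Bool → List String → Bool × List String
  | [], arr, out => (arr, out)
  | c :: t, arr, out =>
    if c = '[' then pvGoHead t true out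
    else
      match pvPrim c with
      | some p => pvGoHead t false (out ++ [p ++ (if arr then "[]" else "")])
      | none => pvGoHead t arr out

-- B's outer `for k, seg in enumerate(segments)` loop; "k == len(segments)-1" is "rest = []";
-- seg.partition('L') is exactly takeWhile/dropWhile at the first 'L'
def pvGoSegs : List (List Char) → Bool → List String → List String
  | [], _, out => out
  | seg :: rest, arr, out =>
    match seg.dropWhile (· ≠ 'L') with
    | [] => pvGoSegs rest (pvGoHead (seg.takeWhile (· ≠ 'L')) arr out).1
                          (pvGoHead (seg.takeWhile (· ≠ 'L')) arr out).2
    | _ :: obj =>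
      match rest with
      | [] => (pvGoHead (seg.takeWhile (· ≠ 'L')) arr out).2   -- break: unterminated descriptor
      | _ => pvGoSegs rest false
          ((pvGoHead (seg.takeWhile (· ≠ 'L')) arr out).2
            ++ [String.ofList ('L' :: obj ++ [';'])
                ++ (if (pvGoHead (seg.takeWhile (· ≠ 'L')) arr out).1 then "[]" else "")])

def get_types_as_list_py_alt (types_str : String) : List String :=
  let ts := PySem.Str.replace (PySem.Str.replace types_str "(" "") ")" ""
  pvGoSegs (pvSplitSemi ts.toList) false []

-- ===== PRECONDITION & SPEC =====
def Spec_get_types_as_list_py (types_str : String) (out : List String) : Prop := out = get_types_as_list_py_alt types_str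
instance (types_str : String) (out : List String) : Decidable (Spec_get_types_as_list_py types_str out) := by unfold Spec_get_types_as_list_py; infer_instance

-- ===== CLAIM (what is proved, stated in full; the proofs are below) =====
def Claim_equal_get_types_as_list_py : Prop := ∀ (types_str : String), Dom_get_types_as_list_py types_str → Spec_get_types_as_list_py types_str (get_types_as_list_py types_str)

-- ===== LEMMAS AND PROOFS =====

-- reference recursion both ports are reduced to
def pvRef : List Char → Bool → List String
  | [], _ => []
  | c :: t, arr =>
    if c = '[' then pvRef t true
    else
      match pvPrim c with
      | some p => (p ++ (if arr then "[]" else "")) :: pvRef t false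
      | none =>
        if c = 'L' then
          if (t.dropWhile (· ≠ ';')).isEmpty then [] else
            (String.ofList ('L' :: t.takeWhile (· ≠ ';') ++ [';']) ++ (if arr then "[]" else ""))
              :: pvRef (t.dropWhile (· ≠ ';')).tail false
        else pvRef t arr
  termination_by l _ => l.length
  decreasing_by
    all_goals simp_wf
    · have h1 : (t.dropWhile (fun x => !decide (x = ';'))).length ≤ t.length :=
        t.length_dropWhile_le _
      have h2 : ((t.dropWhile (fun x => !decide (x = ';'))).tail).length
          = (t.dropWhile (fun x => !decide (x = ';'))).length - 1 := List.length_tail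
      omega


theorem pvFirstDrop {p : Char → Bool} {l : List Char} {c : Char} {t : List Char}
    (h : l.dropWhile p = c :: t) : p c = false := by
  induction l with
  | nil => simp [List.dropWhile] at h
  | cons a l ih =>
    rw [List.dropWhile] at h
    by_cases ha : p a
    · exact ih (by simpa [ha] using h)
    · simp only [Bool.not_eq_true] at ha
      rw [ha] at h
      simp at h
      rw [← h.1]
      simpa using ha

theorem pvSplitSemi_ne_nil (cs : List Char) : pvSplitSemi cs ≠ [] := by
  induction cs with
  | nil => simp [pvSplitSemi]
  | cons c t ih =>
    rw [pvSplitSemi]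
    split_ifs
    · simp
    · cases h : pvSplitSemi t with
      | nil => simp
      | cons s ss => simp

theorem pvSplitSemi_no_semi (cs : List Char) :
    ∀ seg ∈ pvSplitSemi cs, ∀ c ∈ seg, c ≠ ';' := by
  induction cs with
  | nil => intro seg hseg c hc; simp [pvSplitSemi] at hseg; simp [hseg] at hc
  | cons a t ih =>
    intro seg hseg c hc
    rw [pvSplitSemi] at hseg
    by_cases ha : a = ';'
    · simp [ha] at hseg
      rcases hseg with h | h
      · simp [h] at hc
      · exact ih seg h c hc
    · rw [if_neg ha] at hseg
      cases h : pvSplitSemi t with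
      | nil => exact absurd h (pvSplitSemi_ne_nil t)
      | cons s ss =>
        rw [h] at hseg
        simp at hseg
        rcases hseg with h1 | h1
        · subst h1
          simp at hc
          rcases hc with h2 | h2
          · subst h2; exact ha
          · exact ih s (by rw [h]; simp) c h2
        · exact ih seg (by rw [h]; simp [h1]) c hc

-- s.split(';') joined back with ';' is s
def pvJoinSemi : List (List Char) → List Char
  | [] => []
  | [s] => s
  | s :: r => s ++ ';' :: pvJoinSemi r

theorem pvJoinSemi_cons2 (s s2 : List Char) (r : List (List Char)) :
    pvJoinSemi (s :: s2 :: r) = s ++ ';' :: pvJoinSemi (s2 :: r) := rfl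

theorem pvJoin_split (cs : List Char) : pvJoinSemi (pvSplitSemi cs) = cs := by
  induction cs with
  | nil => simp [pvSplitSemi, pvJoinSemi]
  | cons a t ih =>
    rw [pvSplitSemi]
    by_cases ha : a = ';'
    · subst ha
      rw [if_pos rfl]
      cases h : pvSplitSemi t with
      | nil => exact absurd h (pvSplitSemi_ne_nil t)
      | cons s ss =>
        rw [pvJoinSemi_cons2]
        rw [h] at ih
        simpa using ih
    · rw [if_neg ha]
      cases h : pvSplitSemi t with
      | nil => exact absurd h (pvSplitSemi_ne_nil t)
      | cons s ss =>
        rw [h] at ih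
        cases ss with
        | nil => rw [show pvJoinSemi [a :: s] = a :: s from rfl]
                 rw [show pvJoinSemi [s] = s from rfl] at ih
                 simp [ih]
        | cons s2 ss2 =>
          rw [pvJoinSemi_cons2]
          rw [pvJoinSemi_cons2] at ih
          simpa using ih

-- pvRef ignores a ';' seen outside an object descriptor
theorem pvRef_semi (t : List Char) (arr : Bool) : pvRef (';' :: t) arr = pvRef t arr := by
  rw [pvRef]
  simp [pvPrim]

-- span facts over an ';'-free prefix
theorem pvSpanAll {l : List Char} (h : ∀ c ∈ l, c ≠ ';') (r : List Char) :
    (l ++ r).dropWhile (· ≠ ';') = r.dropWhile (· ≠ ';') ∧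
    (l ++ r).takeWhile (· ≠ ';') = l ++ r.takeWhile (· ≠ ';') := by
  induction l with
  | nil => simp
  | cons a l ih =>
    have ha : a ≠ ';' := h a (by simp)
    have ih2 := ih (fun c hc => h c (by simp [hc]))
    constructor
    · rw [List.cons_append, List.dropWhile_cons, if_pos (by simpa using ha), ih2.1]
    · rw [List.cons_append, List.takeWhile_cons, if_pos (by simpa using ha), ih2.2,
          List.cons_append]

-- the inner head loop agrees with pvRef on an 'L'-free prefix
theorem pvHead_ref (head : List Char) (hL : ∀ c ∈ head, c ≠ 'L') :
    ∀ (tail : List Char) (arr : Bool) (out : List String),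
      out ++ pvRef (head ++ tail) arr =
        (pvGoHead head arr out).2 ++ pvRef tail (pvGoHead head arr out).1 := by
  induction head with
  | nil => intro tail arr out; simp [pvGoHead]
  | cons c t ih =>
    intro tail arr out
    have hcL : c ≠ 'L' := hL c (by simp)
    have htL : ∀ x ∈ t, x ≠ 'L' := fun x hx => hL x (by simp [hx])
    rw [List.cons_append, pvRef, pvGoHead]
    by_cases hb : c = '['
    · simp only [if_pos hb]
      exact ih htL tail true out
    · rw [if_neg hb, if_neg hb]
      cases hp : pvPrim c with
      | some p =>
        simp only
        rw [← ih htL tail false (out ++ [p ++ (if arr then "[]" else "")])]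
        simp
      | none =>
        simp only [if_neg hcL]
        exact ih htL tail arr out

-- the segment loop agrees with pvRef of the joined segments
theorem pvSegs_ref (segs : List (List Char)) :
    segs ≠ [] →
    (∀ seg ∈ segs, ∀ c ∈ seg, c ≠ ';') →
    ∀ (arr : Bool) (out : List String),
      pvGoSegs segs arr out = out ++ pvRef (pvJoinSemi segs) arr := by
  induction segs with
  | nil => intro h; exact absurd rfl h
  | cons seg rest ih =>
    intro _ hns arr out
    have hsegns : ∀ c ∈ seg, c ≠ ';' := hns seg (by simp)
    have hheadL : ∀ c ∈ seg.takeWhile (· ≠ 'L'), c ≠ 'L' := by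
      intro c hc
      have := List.mem_takeWhile_imp hc
      simpa using this
    have hspan := seg.takeWhile_append_dropWhile (p := (· ≠ 'L'))
    rw [pvGoSegs]
    cases hdrop : seg.dropWhile (· ≠ 'L') with
    | nil =>
      -- no 'L' in this segment: seg is all head
      have hseg : seg.takeWhile (· ≠ 'L') = seg := by
        rw [hdrop] at hspan; simpa using hspan
      cases rest with
      | nil =>
        rw [pvGoSegs]
        rw [show pvJoinSemi [seg] = seg from rfl]
        have h0 := pvHead_ref seg (hseg ▸ hheadL) [] arr out
        rw [hseg]
        rw [show pvRef [] (pvGoHead seg arr out).1 = [] from by rw [pvRef]] at h0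
        simpa using h0.symm
      | cons s2 r2 =>
        rw [ih (by simp) (fun s hs => hns s (by simp [hs])) _ _]
        rw [pvJoinSemi_cons2]
        have h0 := pvHead_ref seg (hseg ▸ hheadL) (';' :: pvJoinSemi (s2 :: r2)) arr out
        rw [hseg]
        rw [h0, pvRef_semi]
    | cons d obj =>
      -- seg = head ++ 'L' :: obj
      have hd : d = 'L' := by
        have := pvFirstDrop hdrop
        simpa using this
      subst hd
      have hsegeq : seg = seg.takeWhile (· ≠ 'L') ++ 'L' :: obj := by
        rw [← hdrop]; exact hspan.symm
      have hobjns : ∀ c ∈ obj, c ≠ ';' := by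
        intro c hc
        exact hsegns c (by rw [hsegeq]; simp [hc])
      cases rest with
      | nil =>
        -- last segment: descriptor unterminated, loop breaks
        rw [show pvJoinSemi [seg] = seg from rfl]
        have h0 := pvHead_ref (seg.takeWhile (· ≠ 'L')) hheadL ('L' :: obj) arr out
        rw [← hsegeq] at h0
        rw [h0]
        rw [pvRef]
        have hde : obj.dropWhile (· ≠ ';') = [] := by
          rw [List.dropWhile_eq_nil_iff]
          intro x hx; simpa using hobjns x hx
        simp only [pvPrim, hde, List.isEmpty_nil]
        simp
      | cons s2 r2 =>
        rw [pvJoinSemi_cons2]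
        have h0 := pvHead_ref (seg.takeWhile (· ≠ 'L'))
          hheadL ('L' :: (obj ++ ';' :: pvJoinSemi (s2 :: r2))) arr out
        have hassoc : seg ++ ';' :: pvJoinSemi (s2 :: r2)
            = seg.takeWhile (· ≠ 'L') ++ 'L' :: (obj ++ ';' :: pvJoinSemi (s2 :: r2)) := by
          conv_lhs => rw [hsegeq]
          simp
        rw [hassoc, h0]
        rw [pvRef]
        have hsp := pvSpanAll hobjns (';' :: pvJoinSemi (s2 :: r2))
        have hdw : (obj ++ ';' :: pvJoinSemi (s2 :: r2)).dropWhile (· ≠ ';')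
            = ';' :: pvJoinSemi (s2 :: r2) := by
          rw [hsp.1, List.dropWhile_cons]; simp
        have htw : (obj ++ ';' :: pvJoinSemi (s2 :: r2)).takeWhile (· ≠ ';') = obj := by
          rw [hsp.2, List.takeWhile_cons]; simp
        rw [if_neg (show ¬('L' = '[') from by decide)]
        simp only [show pvPrim 'L' = none from rfl]
        rw [if_pos trivial, hdw, htw]
        rw [show (';' :: pvJoinSemi (s2 :: r2)).isEmpty = false from rfl]
        rw [if_neg Bool.false_ne_true, List.tail_cons]
        rw [ih (by simp) (fun s hs => hns s (by simp [hs]))]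
        simp

set_option maxHeartbeats 1600000 in
-- A's index loop agrees with pvRef (part 1: is_object = False; part 2: is_object = True)
theorem pvMainA (cs : List Char) : ∀ (fA i : Nat), cs.length - i ≤ fA →
    (∀ (arr : Bool) (start : Nat) (acc : List String),
        pvGoA cs fA i false arr start acc = acc ++ pvRef (cs.drop i) arr) ∧
    (∀ (arr : Bool) (start : Nat) (acc : List String), start ≤ i →
        pvGoA cs fA i true arr start acc =
          match (cs.drop i).dropWhile (· ≠ ';') with
          | [] => acc
          | _ :: rest =>
            (acc ++ [if arr then String.ofList ((cs.drop start).take (i-start)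
                              ++ (cs.drop i).takeWhile (· ≠ ';') ++ [';']) ++ "[]"
                     else String.ofList ((cs.drop start).take (i-start)
                              ++ (cs.drop i).takeWhile (· ≠ ';') ++ [';'])])
              ++ pvRef rest false) := by
  intro fA
  induction fA with
  | zero =>
    intro i hle
    have hge : cs.length ≤ i := by omega
    have hdrop : cs.drop i = [] := List.drop_eq_nil_of_le hge
    refine ⟨fun arr start acc => ?_, fun arr start acc hs => ?_⟩
    · simp [pvGoA, hdrop, pvRef]
    · simp [pvGoA, hdrop]
  | succ fA ih =>
    intro i hle
    by_cases h : i < cs.length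
    · have hfa : cs.length - (i+1) ≤ fA := by omega
      obtain ⟨ih1, ih2⟩ := ih (i+1) hfa
      have hget : cs[i]! = cs[i] := getElem!_pos cs i h
      have hdc : cs.drop i = cs[i] :: cs.drop (i+1) := List.drop_eq_getElem_cons h
      have htake : ∀ start : Nat, start ≤ i →
          (cs.drop start).take (i+1-start) = (cs.drop start).take (i-start) ++ [cs[i]] := by
        intro start hs
        have he : i+1-start = (i-start)+1 := by omega
        rw [he, List.take_add_one]
        have hg : (cs.drop start)[i-start]? = some cs[i] := by
          rw [List.getElem?_drop]
          have : start + (i - start) = i := by omega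
          rw [this]
          exact List.getElem?_eq_getElem h
        simp [hg]
      refine ⟨fun arr start acc => ?_, fun arr start acc hs => ?_⟩
      · -- is_object = False step
        rw [pvGoA, if_pos h, if_neg Bool.false_ne_true, hget]
        rw [hdc, pvRef]
        by_cases h1 : cs[i] = 'Z'
        · rw [if_pos h1, if_neg (show ¬(cs[i] = '[') from by rw [h1]; decide)]
          simp only [h1, show pvPrim 'Z' = some "boolean" from rfl]
          rw [ih1 false start _]; cases arr <;> simp
        · rw [if_neg h1]
          by_cases h2 : cs[i] = 'B'
          · rw [if_pos h2, if_neg (show ¬(cs[i] = '[') from by rw [h2]; decide)]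
            simp only [h2, show pvPrim 'B' = some "byte" from rfl]
            rw [ih1 false start _]; cases arr <;> simp
          · rw [if_neg h2]
            by_cases h3 : cs[i] = 'C'
            · rw [if_pos h3, if_neg (show ¬(cs[i] = '[') from by rw [h3]; decide)]
              simp only [h3, show pvPrim 'C' = some "char" from rfl]
              rw [ih1 false start _]; cases arr <;> simp
            · rw [if_neg h3]
              by_cases h4 : cs[i] = 'D'
              · rw [if_pos h4, if_neg (show ¬(cs[i] = '[') from by rw [h4]; decide)]
                simp only [h4, show pvPrim 'D' = some "double" from rfl]
                rw [ih1 false start _]; cases arr <;> simp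
              · rw [if_neg h4]
                by_cases h5 : cs[i] = 'F'
                · rw [if_pos h5, if_neg (show ¬(cs[i] = '[') from by rw [h5]; decide)]
                  simp only [h5, show pvPrim 'F' = some "float" from rfl]
                  rw [ih1 false start _]; cases arr <;> simp
                · rw [if_neg h5]
                  by_cases h6 : cs[i] = 'I'
                  · rw [if_pos h6, if_neg (show ¬(cs[i] = '[') from by rw [h6]; decide)]
                    simp only [h6, show pvPrim 'I' = some "integer" from rfl]
                    rw [ih1 false start _]; cases arr <;> simp
                  · rw [if_neg h6]
                    by_cases h7 : cs[i] = 'J'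
                    · rw [if_pos h7, if_neg (show ¬(cs[i] = '[') from by rw [h7]; decide)]
                      simp only [h7, show pvPrim 'J' = some "long" from rfl]
                      rw [ih1 false start _]; cases arr <;> simp
                    · rw [if_neg h7]
                      by_cases h8 : cs[i] = 'S'
                      · rw [if_pos h8, if_neg (show ¬(cs[i] = '[') from by rw [h8]; decide)]
                        simp only [h8, show pvPrim 'S' = some "short" from rfl]
                        rw [ih1 false start _]; cases arr <;> simp
                      · rw [if_neg h8]
                        by_cases h9 : cs[i] = 'V'
                        · rw [if_pos h9, if_neg (show ¬(cs[i] = '[') from by rw [h9]; decide)]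
                          simp only [h9, show pvPrim 'V' = some "void" from rfl]
                          rw [ih1 false start _]; cases arr <;> simp
                        · rw [if_neg h9]
                          by_cases h10 : cs[i] = 'L'
                          · rw [if_pos h10, if_neg (show ¬(cs[i] = '[') from by rw [h10]; decide)]
                            have hp : pvPrim cs[i] = none := by rw [h10]; rfl
                            simp only [hp, if_pos h10]
                            rw [ih2 arr i acc (by omega)]
                            have ht1 : (cs.drop i).take (i+1-i) = [cs[i]] := by
                              have h' := htake i (le_refl i)
                              simpa using h'
                            cases hq : (cs.drop (i+1)).dropWhile (· ≠ ';') with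
                            | nil => simp
                            | cons x rest =>
                              simp only [List.isEmpty_cons, Bool.false_eq_true,
                                if_false]
                              rw [ht1]
                              cases arr <;> simp [h10]
                          · rw [if_neg h10]
                            by_cases h11 : cs[i] = '['
                            · rw [if_pos h11, if_pos h11]
                              exact ih1 true start acc
                            · rw [if_neg h11, if_neg h11]
                              have hp : pvPrim cs[i] = none := by
                                unfold pvPrim
                                split <;> simp_all
                              simp only [hp, if_neg h10]
                              exact ih1 arr start acc
      · -- is_object = True step
        rw [pvGoA, if_pos h, if_pos rfl, hget]
        by_cases hsemi : cs[i] = ';'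
        · rw [if_pos hsemi]
          rw [ih1 false start _]
          have hdw : (cs.drop i).dropWhile (· ≠ ';') = ';' :: cs.drop (i+1) := by
            rw [hdc, hsemi, List.dropWhile_cons]; simp
          have htw : (cs.drop i).takeWhile (· ≠ ';') = [] := by
            rw [hdc, hsemi, List.takeWhile_cons]; simp
          simp only [hdw]
          rw [htw, htake start hs, hsemi]
          cases arr <;> simp
        · rw [if_neg hsemi]
          rw [ih2 arr start acc (by omega)]
          have hdw : (cs.drop i).dropWhile (· ≠ ';') = (cs.drop (i+1)).dropWhile (· ≠ ';') := by
            rw [hdc, List.dropWhile_cons]; simp [hsemi]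
          have htw : (cs.drop i).takeWhile (· ≠ ';')
              = cs[i] :: (cs.drop (i+1)).takeWhile (· ≠ ';') := by
            rw [hdc, List.takeWhile_cons]; simp [hsemi]
          rw [hdw]
          cases hq : (cs.drop (i+1)).dropWhile (· ≠ ';') with
          | nil => simp
          | cons x rest =>
            simp only
            rw [htake start hs, htw]
            cases arr <;> simp
    · have hdrop : cs.drop i = [] := List.drop_eq_nil_of_le (by omega)
      refine ⟨fun arr start acc => ?_, fun arr start acc hs => ?_⟩
      · rw [pvGoA, if_neg h, hdrop]
        rw [show pvRef [] arr = [] from by rw [pvRef]]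
        simp
      · rw [pvGoA, if_neg h, hdrop]
        simp [List.dropWhile]

-- ===== VERDICT (by name: the statement is the Claim_ definition above) =====
theorem get_types_as_list_py_spec : Claim_equal_get_types_as_list_py := by
  intro s _
  unfold Spec_get_types_as_list_py get_types_as_list_py get_types_as_list_py_alt
  set cs := (PySem.Str.replace (PySem.Str.replace s "(" "") ")" "").toList with hcs
  have hA := (pvMainA cs cs.length 0 (by omega)).1 false 0 []
  rw [hA]
  rw [pvSegs_ref (pvSplitSemi cs) (pvSplitSemi_ne_nil cs) (pvSplitSemi_no_semi cs) false []]
  rw [pvJoin_split]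
  simp
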